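-- pv_equiv track=rewrite | github.com/pr28416/Garage | temp.py | other
-- ===== SOURCE A (Python) =====
-- def sjh(a):
--     for i in range(len(a)):
--         foo = i
--         for j in range(i+1, len(a)):
--             if (a[foo] < a[j] and a[j] % 2 == 0):
--                 foo = j
--         a[i], a[foo] = a[foo], a[i]
--     return a
--
-- def other(s):
--     a = list()
--     for l in s:
--         a.append(ord(l)-ord('a'))
--     p = sjh(a)
--     rec=""
--     for a in p:
--         rec += chr(a+ord('a'))
--     return rec
-- ===== SOURCE B (Python) =====
-- def other(s):
--     # Process left to right: take the front value v; among the remaining values,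
--     # pick the largest even one greater than v (if any), emit it, and drop v into
--     # that value's first position. No index arithmetic, no in-place selection scan.
--     xs = [ord(c) - ord('a') for c in s]
--     out = []
--     while xs:
--         v = xs.pop(0)
--         cands = [x for x in xs if x % 2 == 0 and v < x]
--         if cands:
--             m = max(cands)
--             xs[xs.index(m)] = v
--             out.append(m)
--         else:
--             out.append(v)
--     return ''.join(chr(x + ord('a')) for x in out)
-- ===== Notes on version B (the rewrite author's own statement) =====
-- stated objective: simpler
-- what changed: A runs an in-place index-based selection pass with a nested scan tracking a running swap target and explicit tuple-swaps; B recurses on a shrinking list, picking the largest even value greater than the front via filter+max and dropping the front into that value's first position, with no index arithmetic or swaps.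
import Mathlib
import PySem

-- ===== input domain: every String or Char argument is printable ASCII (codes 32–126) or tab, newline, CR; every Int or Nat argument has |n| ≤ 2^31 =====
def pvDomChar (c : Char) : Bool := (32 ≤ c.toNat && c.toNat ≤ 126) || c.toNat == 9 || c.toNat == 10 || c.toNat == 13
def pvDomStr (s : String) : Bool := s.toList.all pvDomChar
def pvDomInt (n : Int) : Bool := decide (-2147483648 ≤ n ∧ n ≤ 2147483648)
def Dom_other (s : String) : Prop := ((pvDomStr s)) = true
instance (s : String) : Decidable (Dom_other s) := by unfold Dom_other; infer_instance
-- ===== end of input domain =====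

-- B replaces A's in-place index/swap selection loops by a single left-to-right pass over a
-- shrinking list (filter + max + first-occurrence replacement); objective: simpler, same cost class.

-- ===== PORT A =====
-- body of A's outer `for i in range(len(a))` loop (the inner `for j` loop plus the swap)
def sjhStep (a : List Int) (i : Int) : List Int :=
  let foo := (PySem.List.pyRange (i + 1) (PySem.List.len a) 1).foldl
    (fun foo j =>
      if PySem.List.pyGetD a foo 0 < PySem.List.pyGetD a j 0 ∧
         PySem.Int.mod (PySem.List.pyGetD a j 0) 2 = 0 then j else foo) i
  PySem.List.pySetD (PySem.List.pySetD a i (PySem.List.pyGetD a foo 0)) foo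
    (PySem.List.pyGetD a i 0)

def sjh (a : List Int) : List Int :=
  (PySem.List.pyRange 0 (PySem.List.len a) 1).foldl sjhStep a

def other (s : String) : String :=
  let a : List Int := s.toList.foldl (fun acc l => acc ++ [(l.toNat : Int) - 97]) []
  let p := sjh a
  String.ofList (p.foldl (fun rec x => rec ++ [Char.ofNat (x + 97).toNat]) [])

-- ===== PORT B =====
def otherLoop : List Int → List Int
  | [] => []
  | v :: xs =>
    match PySem.List.max? (xs.filter (fun x => PySem.Int.mod x 2 == 0 && decide (v < x)))
        (fun y => y) with
    | none => v :: otherLoop xs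
    | some m => m :: otherLoop (xs.set ((PySem.List.index? xs m).getD 0) v)
termination_by xs => xs.length
decreasing_by all_goals simp [List.length_set]

def other_alt (s : String) : String :=
  String.ofList ((otherLoop (s.toList.map (fun c => (c.toNat : Int) - 97))).map
    (fun x => Char.ofNat (x + 97).toNat))

-- ===== PRECONDITION & SPEC =====
def Spec_other (s : String) (out : String) : Prop := out = other_alt s
instance (s : String) (out : String) : Decidable (Spec_other s out) := by unfold Spec_other; infer_instance

-- ===== CLAIM (what is proved, stated in full; the proofs are below) =====
def Claim_equal_other : Prop := ∀ (s : String), Dom_other s → Spec_other s (other s)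

-- ===== LEMMAS AND PROOFS =====

def selSpec (pre : List Int) (v : Int) (ys : List Int) : Int :=
  match PySem.List.max? (ys.filter (fun x => PySem.Int.mod x 2 == 0 && decide (v < x)))
      (fun y => y) with
  | none => (pre.length : Int)
  | some m => (pre.length : Int) + 1 + ((PySem.List.index? ys m).getD 0 : Int)

theorem selSpec_none (pre ys : List Int) (v : Int)
    (h : PySem.List.max? (ys.filter (fun x => PySem.Int.mod x 2 == 0 && decide (v < x)))
      (fun y => y) = none) : selSpec pre v ys = (pre.length : Int) := by
  unfold selSpec; rw [h]

theorem selSpec_some (pre ys : List Int) (v m : Int)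
    (h : PySem.List.max? (ys.filter (fun x => PySem.Int.mod x 2 == 0 && decide (v < x)))
      (fun y => y) = some m) :
    selSpec pre v ys = (pre.length : Int) + 1 + ((PySem.List.index? ys m).getD 0 : Int) := by
  unfold selSpec; rw [h]

theorem lookup_head (pre xs : List Int) (v : Int) :
    PySem.List.pyGetD (pre ++ v :: xs) ((pre.length : Int)) 0 = v := by
  rw [PySem.List.pyGetD_natCast]
  simp [List.getD]

theorem lookup_tail (pre xs : List Int) (v : Int) (r : Nat) (hr : r < xs.length) :
    PySem.List.pyGetD (pre ++ v :: xs) ((pre.length : Int) + 1 + r) 0 = xs[r] := by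
  have h1 : ((pre.length : Int) + 1 + r) = ((pre.length + 1 + r : Nat) : Int) := by push_cast; ring
  rw [h1, PySem.List.pyGetD_natCast]
  have h2 : pre.length ≤ pre.length + 1 + r := by omega
  simp only [List.getD, List.getElem?_append_right h2]
  have h3 : pre.length + 1 + r - pre.length = r + 1 := by omega
  rw [h3]
  simp [hr]

theorem max?_id_append_singleton (l : List Int) (mv x : Int)
    (h : PySem.List.max? l (fun y => y) = some mv) :
    PySem.List.max? (l ++ [x]) (fun y => y) = some (max mv x) := by
  cases l with
  | nil =>
    have : PySem.List.max? ([] : List Int) (fun y => y) = none :=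
      (PySem.List.max?_eq_none_iff _ _).mpr rfl
    rw [this] at h; cases h
  | cons c rest =>
    rw [PySem.List.max?_id_cons] at h
    rw [List.cons_append, PySem.List.max?_id_cons, List.foldl_append]
    simp at h
    simp [h]

theorem inner_aux (pre xs : List Int) (v : Int) :
    ∀ t, t ≤ xs.length →
    (List.range t).foldl
      (fun foo (r : Nat) =>
        if PySem.List.pyGetD (pre ++ v :: xs) foo 0 <
             PySem.List.pyGetD (pre ++ v :: xs) ((pre.length : Int) + 1 + (r : Int)) 0 ∧
           PySem.Int.mod (PySem.List.pyGetD (pre ++ v :: xs) ((pre.length : Int) + 1 + (r : Int)) 0) 2 = 0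
        then (pre.length : Int) + 1 + (r : Int) else foo)
      ((pre.length : Int))
    = selSpec pre v (xs.take t) := by
  intro t
  induction t with
  | zero =>
    intro _
    rw [List.range_zero, List.foldl_nil, List.take_zero,
      selSpec_none pre [] v ((PySem.List.max?_eq_none_iff _ _).mpr rfl)]
  | succ t iht =>
    intro hle
    have hx : t < xs.length := hle
    rw [List.range_succ, List.foldl_append, iht (le_of_lt hx), List.foldl_cons, List.foldl_nil]
    have htake : xs.take (t+1) = xs.take t ++ [xs[t]] := by
      rw [List.take_add_one]; simp [List.getElem?_eq_getElem hx]
    cases hmax : PySem.List.max?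
        ((xs.take t).filter (fun x => PySem.Int.mod x 2 == 0 && decide (v < x))) (fun y => y) with
    | none =>
      have hfilt : (xs.take t).filter (fun x => PySem.Int.mod x 2 == 0 && decide (v < x)) = [] :=
        (PySem.List.max?_eq_none_iff _ _).mp hmax
      rw [selSpec_none pre (xs.take t) v hmax, lookup_head, lookup_tail pre xs v t hx]
      by_cases hc : v < xs[t] ∧ PySem.Int.mod (xs[t]) 2 = 0
      · rw [if_pos hc]
        have hpx : (PySem.Int.mod (xs[t]) 2 == 0 && decide (v < xs[t])) = true := by
          simp only [Bool.and_eq_true, beq_iff_eq, decide_eq_true_eq]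
          exact ⟨hc.2, hc.1⟩
        have hnot : xs[t] ∉ xs.take t := by
          intro hmem
          have : xs[t] ∈ (xs.take t).filter (fun x => PySem.Int.mod x 2 == 0 && decide (v < x)) :=
            List.mem_filter.mpr ⟨hmem, hpx⟩
          rw [hfilt] at this; cases this
        have hmax' : PySem.List.max?
            ((xs.take (t+1)).filter (fun x => PySem.Int.mod x 2 == 0 && decide (v < x)))
            (fun y => y) = some (xs[t]) := by
          rw [htake, List.filter_append, hfilt, List.nil_append]
          simp only [List.filter_cons, hpx, if_true, List.filter_nil]
          simp [PySem.List.max?_id_cons]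
        rw [selSpec_some pre (xs.take (t+1)) v (xs[t]) hmax', htake,
          PySem.List.index?_append_singleton_self _ _ hnot]
        simp [List.length_take, min_eq_left (le_of_lt hx)]
      · rw [if_neg hc]
        have hpx : (PySem.Int.mod (xs[t]) 2 == 0 && decide (v < xs[t])) = false := by
          by_contra hb
          simp only [Bool.not_eq_false, Bool.and_eq_true, beq_iff_eq, decide_eq_true_eq] at hb
          exact hc ⟨hb.2, hb.1⟩
        have hfilt' : (xs.take (t+1)).filter (fun x => PySem.Int.mod x 2 == 0 && decide (v < x)) = [] := by
          rw [htake, List.filter_append, hfilt, List.nil_append]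
          simp only [List.filter_cons, hpx, Bool.false_eq_true, if_false, List.filter_nil]
        rw [selSpec_none pre (xs.take (t+1)) v ((PySem.List.max?_eq_none_iff _ _).mpr hfilt')]
    | some m =>
      have hmem := PySem.List.max?_mem hmax
      have hmxt : m ∈ xs.take t := List.mem_of_mem_filter hmem
      have hpm : PySem.Int.mod m 2 = 0 ∧ v < m := by
        have := (List.mem_filter.mp hmem).2
        simp only [Bool.and_eq_true, beq_iff_eq, decide_eq_true_eq] at this
        exact this
      obtain ⟨k0, hk0⟩ := Option.isSome_iff_exists.mp
        ((PySem.List.index?_isSome_iff (xs.take t) m).mpr hmxt)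
      obtain ⟨hklt, hget, -⟩ := PySem.List.getElem_of_index?_eq_some hk0
      have hk0t : k0 < t := by
        have := hklt; rw [List.length_take] at this; omega
      have hk0x : k0 < xs.length := lt_trans hk0t hx
      have hgetx : xs[k0] = m := by
        rw [← hget]; exact (List.getElem_take ..).symm
      rw [selSpec_some pre (xs.take t) v m hmax, hk0, Option.getD_some,
        lookup_tail pre xs v k0 hk0x, lookup_tail pre xs v t hx, hgetx]
      by_cases hc : m < xs[t] ∧ PySem.Int.mod (xs[t]) 2 = 0
      · rw [if_pos hc]
        have hpx : (PySem.Int.mod (xs[t]) 2 == 0 && decide (v < xs[t])) = true := by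
          simp only [Bool.and_eq_true, beq_iff_eq, decide_eq_true_eq]
          exact ⟨hc.2, lt_trans hpm.2 hc.1⟩
        have hnot : xs[t] ∉ xs.take t := by
          intro hmem'
          have hmf : xs[t] ∈ (xs.take t).filter (fun x => PySem.Int.mod x 2 == 0 && decide (v < x)) :=
            List.mem_filter.mpr ⟨hmem', hpx⟩
          have := PySem.List.max?_isMax hmax _ hmf
          simp only [] at this
          exact absurd hc.1 (not_lt.mpr this)
        have hmax' : PySem.List.max?
            ((xs.take (t+1)).filter (fun x => PySem.Int.mod x 2 == 0 && decide (v < x)))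
            (fun y => y) = some (xs[t]) := by
          rw [htake, List.filter_append]
          simp only [List.filter_cons, hpx, if_true, List.filter_nil]
          rw [max?_id_append_singleton _ m _ hmax, max_eq_right (le_of_lt hc.1)]
        rw [selSpec_some pre (xs.take (t+1)) v (xs[t]) hmax', htake,
          PySem.List.index?_append_singleton_self _ _ hnot]
        simp [List.length_take, min_eq_left (le_of_lt hx)]
      · rw [if_neg hc]
        have hidx' : PySem.List.index? (xs.take (t+1)) m = some k0 := by
          rw [htake, PySem.List.index?_append_of_mem _ hmxt, hk0]
        by_cases hpx : (PySem.Int.mod (xs[t]) 2 == 0 && decide (v < xs[t])) = true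
        · have hex : PySem.Int.mod (xs[t]) 2 = 0 := by
            simp only [Bool.and_eq_true, beq_iff_eq] at hpx; exact hpx.1
          have hxm : xs[t] ≤ m := by
            by_contra hlt
            exact hc ⟨lt_of_not_ge hlt, hex⟩
          have hmax' : PySem.List.max?
              ((xs.take (t+1)).filter (fun x => PySem.Int.mod x 2 == 0 && decide (v < x)))
              (fun y => y) = some m := by
            rw [htake, List.filter_append]
            simp only [List.filter_cons, hpx, if_true, List.filter_nil]
            rw [max?_id_append_singleton _ m _ hmax, max_eq_left hxm]
          rw [selSpec_some pre (xs.take (t+1)) v m hmax', hidx', Option.getD_some]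
        · have hpx' : (PySem.Int.mod (xs[t]) 2 == 0 && decide (v < xs[t])) = false := by
            simpa using hpx
          have hmax' : PySem.List.max?
              ((xs.take (t+1)).filter (fun x => PySem.Int.mod x 2 == 0 && decide (v < x)))
              (fun y => y) = some m := by
            rw [htake, List.filter_append]
            simp only [List.filter_cons, hpx', Bool.false_eq_true, if_false, List.filter_nil]
            rw [List.append_nil]
            exact hmax
          rw [selSpec_some pre (xs.take (t+1)) v m hmax', hidx', Option.getD_some]

theorem inner_char (pre xs : List Int) (v : Int) :
    (PySem.List.pyRange ((pre.length : Int) + 1) (PySem.List.len (pre ++ v :: xs)) 1).foldl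
      (fun foo j =>
        if PySem.List.pyGetD (pre ++ v :: xs) foo 0 < PySem.List.pyGetD (pre ++ v :: xs) j 0 ∧
           PySem.Int.mod (PySem.List.pyGetD (pre ++ v :: xs) j 0) 2 = 0 then j else foo)
      (pre.length : Int)
    = selSpec pre v xs := by
  have hb : PySem.List.len (pre ++ v :: xs) = (pre.length : Int) + 1 + (xs.length : Int) := by
    simp [PySem.List.len_eq]
    ring
  rw [hb, PySem.List.pyRange_one]
  rw [show ((pre.length : Int) + 1 + (xs.length : Int) - ((pre.length : Int) + 1)) = (xs.length : Int) by ring]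
  rw [Int.toNat_natCast, List.foldl_map]
  have h := inner_aux pre xs v xs.length le_rfl
  rw [List.take_length] at h
  exact h

theorem outer_step_none (pre xs : List Int) (v : Int)
    (h : PySem.List.max? (xs.filter (fun x => PySem.Int.mod x 2 == 0 && decide (v < x)))
      (fun y => y) = none) :
    sjhStep (pre ++ v :: xs) (pre.length : Int) = pre ++ v :: xs := by
  unfold sjhStep
  rw [inner_char pre xs v, selSpec_none pre xs v h, lookup_head]
  rw [PySem.List.pySetD_natCast, PySem.List.pySetD_natCast]
  simp

theorem outer_step_some (pre xs : List Int) (v m : Int)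
    (h : PySem.List.max? (xs.filter (fun x => PySem.Int.mod x 2 == 0 && decide (v < x)))
      (fun y => y) = some m) :
    sjhStep (pre ++ v :: xs) (pre.length : Int)
      = pre ++ m :: xs.set ((PySem.List.index? xs m).getD 0) v := by
  have hmem : m ∈ xs.filter (fun x => PySem.Int.mod x 2 == 0 && decide (v < x)) :=
    PySem.List.max?_mem h
  have hmx : m ∈ xs := List.mem_of_mem_filter hmem
  have hidx : (PySem.List.index? xs m).isSome := (PySem.List.index?_isSome_iff xs m).mpr hmx
  obtain ⟨k0, hk0⟩ := Option.isSome_iff_exists.mp hidx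
  obtain ⟨hklt, hget, -⟩ := PySem.List.getElem_of_index?_eq_some hk0
  unfold sjhStep
  rw [inner_char pre xs v, selSpec_some pre xs v m h, hk0]
  simp only [Option.getD_some]
  have hfoo : (pre.length : Int) + 1 + (k0 : Int) = ((pre.length + 1 + k0 : Nat) : Int) := by
    push_cast; ring
  rw [lookup_head, lookup_tail pre xs v k0 hklt, hget]
  rw [hfoo, PySem.List.pySetD_natCast, PySem.List.pySetD_natCast]
  rw [List.set_append_right _ _ (by omega), List.set_append_right _ _ (by omega)]
  simp only [show pre.length - pre.length = 0 by omega,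
    show pre.length + 1 + k0 - pre.length = k0 + 1 by omega]
  simp

theorem outer_loop (suf : List Int) : ∀ (pre : List Int),
    (PySem.List.pyRange ((pre.length : Int)) ((pre.length : Int) + suf.length) 1).foldl
      sjhStep (pre ++ suf)
    = pre ++ otherLoop suf := by
  induction hn : suf.length using Nat.strong_induction_on generalizing suf with
  | _ n ih =>
    intro pre
    match suf with
    | [] =>
      subst hn
      rw [PySem.List.pyRange_one_eq_nil (by simp)]
      simp [otherLoop]
    | v :: xs =>
      subst hn
      have hlt : (pre.length : Int) < (pre.length : Int) + (v :: xs).length := by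
        have : (v :: xs).length = xs.length + 1 := by simp
        rw [this]; push_cast; omega
      rw [PySem.List.pyRange_one_cons hlt, List.foldl_cons]
      cases hmax : PySem.List.max? (xs.filter (fun x => PySem.Int.mod x 2 == 0 && decide (v < x))) (fun y => y) with
      | none =>
        rw [outer_step_none pre xs v hmax]
        have e1 : pre ++ v :: xs = (pre ++ [v]) ++ xs := by simp
        have e2 : (pre.length : Int) + 1 = (((pre ++ [v]).length : Nat) : Int) := by
          simp
        have e3 : (pre.length : Int) + (v :: xs).length
            = ((pre ++ [v]).length : Int) + xs.length := by
          simp only [List.length_append, List.length_cons, List.length_nil]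
          push_cast
          ring
        rw [e1, e2, e3]
        rw [ih xs.length (by simp) xs rfl (pre ++ [v])]
        conv_rhs => rw [otherLoop]
        rw [hmax]
        simp
      | some m =>
        rw [outer_step_some pre xs v m hmax]
        set k0 := (PySem.List.index? xs m).getD 0 with hk0
        have e1 : pre ++ m :: xs.set k0 v = (pre ++ [m]) ++ xs.set k0 v := by simp
        have e2 : (pre.length : Int) + 1 = (((pre ++ [m]).length : Nat) : Int) := by simp
        have e3 : (pre.length : Int) + (v :: xs).length
            = ((pre ++ [m]).length : Int) + (xs.set k0 v).length := by
          simp only [List.length_append, List.length_cons, List.length_nil, List.length_set]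
          push_cast
          ring
        rw [e1, e2, e3]
        rw [ih (xs.set k0 v).length (by simp [List.length_set]) (xs.set k0 v) rfl (pre ++ [m])]
        conv_rhs => rw [otherLoop]
        rw [hmax]
        simp [hk0, PySem.List.index?_eq_idxOf?]

theorem sjh_eq_otherLoop (a : List Int) : sjh a = otherLoop a := by
  have h := outer_loop a []
  simp only [List.nil_append, List.length_nil, Nat.cast_zero, zero_add] at h
  unfold sjh
  simp only [PySem.List.len_eq]
  exact h

-- ===== VERDICT (by name: the statement is the Claim_ definition above) =====
theorem other_spec : Claim_equal_other := by
  intro s _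
  unfold Spec_other other other_alt
  simp only [PySem.List.foldl_append_singleton_eq_map, List.nil_append]
  rw [sjh_eq_otherLoop]
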